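-- pv_equiv track=rewrite | github.com/conk7/AOoR_local_search | src/algos/best_improvement.py | delta_cost_swap
-- ===== SOURCE A (Python) =====
-- from typing import List
--
-- def delta_cost_swap(
--     F: List[List[int]],
--     D: List[List[int]],
--     perm: List[int],
--     i: int,
--     j: int,
-- ) -> int:
--     if i == j:
--         return 0
--
--     n = len(perm)
--     pi, pj = perm[i], perm[j]
--     delta = 0
--
--     for k in range(n):
--         if k == i or k == j:
--             continue
--         pk = perm[k]
--
--         delta += (D[pj][pk] - D[pi][pk]) * F[i][k]
--         delta += (D[pk][pj] - D[pk][pi]) * F[k][i]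
--
--         delta += (D[pi][pk] - D[pj][pk]) * F[j][k]
--         delta += (D[pk][pi] - D[pk][pj]) * F[k][j]
--
--     delta += (D[pj][pj] - D[pi][pi]) * F[i][i]
--     delta += (D[pi][pi] - D[pj][pj]) * F[j][j]
--     delta += (D[pj][pi] - D[pi][pj]) * F[i][j]
--     delta += (D[pi][pj] - D[pj][pi]) * F[j][i]
--
--     return delta
-- ===== SOURCE B (Python) =====
-- from typing import List
--
--
-- def delta_cost_swap(
--     F: List[List[int]],
--     D: List[List[int]],
--     perm: List[int],
--     i: int,
--     j: int,
-- ) -> int: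
--     if i == j:
--         return 0
--
--     n = len(perm)
--     swapped = list(perm)
--     swapped[i], swapped[j] = swapped[j], swapped[i]
--
--     def total(p: List[int]) -> int:
--         return sum(
--             F[a][b] * D[p[a]][p[b]] for a in range(n) for b in range(n)
--         )
--
--     return total(swapped) - total(perm)
-- ===== Notes on version B (the rewrite author's own statement) =====
-- stated objective: alternative
-- what changed: B replaces A's incremental O(n) swap-delta formula by the definition of the QAP objective: it evaluates the full objective for perm and for a swapped copy of perm and returns the difference (O(n^2), exact integer arithmetic).
-- outside the precondition, e.g. on delta_cost_swap([[0, 0], [0, 1]], [[0, 1], [2, 0]], [0, 1], -1, 0): A returns 3, B returns 0; on delta_cost_swap([[1, 1], [1, 1]], [[1, 2], [3, 4]], [0, -1], 0, 1): A returns 0, B returns 0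
import Mathlib
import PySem

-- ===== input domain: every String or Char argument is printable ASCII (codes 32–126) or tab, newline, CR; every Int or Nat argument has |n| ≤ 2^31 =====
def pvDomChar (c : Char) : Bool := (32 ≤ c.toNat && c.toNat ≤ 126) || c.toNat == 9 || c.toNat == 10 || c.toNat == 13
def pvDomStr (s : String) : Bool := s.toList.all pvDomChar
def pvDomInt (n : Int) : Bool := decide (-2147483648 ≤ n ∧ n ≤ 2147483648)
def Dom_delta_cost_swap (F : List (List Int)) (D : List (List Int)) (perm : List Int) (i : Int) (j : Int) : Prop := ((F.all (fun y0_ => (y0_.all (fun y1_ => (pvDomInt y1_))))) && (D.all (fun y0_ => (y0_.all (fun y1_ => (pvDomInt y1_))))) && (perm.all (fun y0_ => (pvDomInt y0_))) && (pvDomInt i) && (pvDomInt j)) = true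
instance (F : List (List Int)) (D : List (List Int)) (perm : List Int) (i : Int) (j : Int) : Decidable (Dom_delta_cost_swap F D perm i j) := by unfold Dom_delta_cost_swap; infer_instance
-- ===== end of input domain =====

-- B replaces A's incremental O(n) swap-delta formula by the definition itself: it evaluates the
-- full QAP objective for the permutation and for a swapped copy and returns the difference
-- (objective: alternative — B is clearer but O(n^2), not faster).

-- shared Python-indexing helpers: xs[k] and M[a][b] as total functions (in range under Pre_)
def pvGetI (xs : List Int) (k : Int) : Int := (PySem.List.pyGet? xs k).getD 0
def pvRow (M : List (List Int)) (a : Int) : List Int := (PySem.List.pyGet? M a).getD []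
def pvAt (M : List (List Int)) (a b : Int) : Int := pvGetI (pvRow M a) b

-- ===== PORT A =====
def delta_cost_swap (F : List (List Int)) (D : List (List Int)) (perm : List Int) (i : Int) (j : Int) : Int :=
  if i = j then 0
  else
    let n : Int := perm.length
    let pi_ := pvGetI perm i
    let pj_ := pvGetI perm j
    let delta : Int :=
      (PySem.List.pyRange 0 n 1).foldl (fun delta k =>
        if k = i ∨ k = j then delta
        else
          let pk := pvGetI perm k
          let delta := delta + (pvAt D pj_ pk - pvAt D pi_ pk) * pvAt F i k
          let delta := delta + (pvAt D pk pj_ - pvAt D pk pi_) * pvAt F k i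
          let delta := delta + (pvAt D pi_ pk - pvAt D pj_ pk) * pvAt F j k
          delta + (pvAt D pk pi_ - pvAt D pk pj_) * pvAt F k j) 0
    let delta := delta + (pvAt D pj_ pj_ - pvAt D pi_ pi_) * pvAt F i i
    let delta := delta + (pvAt D pi_ pi_ - pvAt D pj_ pj_) * pvAt F j j
    let delta := delta + (pvAt D pj_ pi_ - pvAt D pi_ pj_) * pvAt F i j
    delta + (pvAt D pi_ pj_ - pvAt D pj_ pi_) * pvAt F j i

-- ===== PORT B =====
-- total(p) = sum(F[a][b] * D[p[a]][p[b]] for a in range(n) for b in range(n))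
def pvTotal (F : List (List Int)) (D : List (List Int)) (p : List Int) (n : Int) : Int :=
  ((PySem.List.pyRange 0 n 1).flatMap (fun a =>
    (PySem.List.pyRange 0 n 1).map (fun b =>
      pvAt F a b * pvAt D (pvGetI p a) (pvGetI p b)))).sum

def delta_cost_swap_alt (F : List (List Int)) (D : List (List Int)) (perm : List Int) (i : Int) (j : Int) : Int :=
  if i = j then 0
  else
  let n : Int := perm.length
  let swapped := PySem.List.pySetD (PySem.List.pySetD perm i (pvGetI perm j)) j (pvGetI perm i)
  pvTotal F D swapped n - pvTotal F D perm n

-- ===== PRECONDITION & SPEC =====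
-- Pre_ excludes (besides inputs where A raises) three corners on which A still returns a value:
-- F/D rows too short for the full n×n objective (A reads only rows/columns i and j; B's
-- full-objective sums raise IndexError there), negative perm entries, and in-range NEGATIVE
-- positions i/j with i ≠ j — Python wraparound positions are outside this function's intended
-- domain (its callers pass indices from range(n)), and A and B resolve them differently: A
-- compares the raw negative index against the loop counter while indexing with wraparound,
-- B swaps the wrapped positions.
def Pre_delta_cost_swap (F : List (List Int)) (D : List (List Int)) (perm : List Int) (i : Int) (j : Int) : Prop :=
  i = j ∨
  (perm.length ≤ F.length ∧
  (∀ r ∈ F, perm.length ≤ r.length) ∧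
  (∀ v ∈ perm, 0 ≤ v ∧ v < (D.length : Int) ∧
    ∀ w ∈ perm, w < ((D.getD v.toNat []).length : Int)) ∧
  (0 ≤ i ∧ i < (perm.length : Int)) ∧
  (0 ≤ j ∧ j < (perm.length : Int)))
instance (F : List (List Int)) (D : List (List Int)) (perm : List Int) (i : Int) (j : Int) : Decidable (Pre_delta_cost_swap F D perm i j) := by unfold Pre_delta_cost_swap; infer_instance

def pvWitness_delta_cost_swap : List (List Int) × List (List Int) × List Int × Int × Int :=
  ([[1]], [[2]], [0], 0, 0)

def Spec_delta_cost_swap (F : List (List Int)) (D : List (List Int)) (perm : List Int) (i : Int) (j : Int) (out : Int) : Prop := out = delta_cost_swap_alt F D perm i j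
instance (F : List (List Int)) (D : List (List Int)) (perm : List Int) (i : Int) (j : Int) (out : Int) : Decidable (Spec_delta_cost_swap F D perm i j out) := by unfold Spec_delta_cost_swap; infer_instance

-- ===== CLAIM (what is proved, stated in full; the proofs are below) =====
def Claim_equal_delta_cost_swap : Prop := ∀ (F : List (List Int)) (D : List (List Int)) (perm : List Int) (i : Int) (j : Int), Dom_delta_cost_swap F D perm i j → Pre_delta_cost_swap F D perm i j → Spec_delta_cost_swap F D perm i j (delta_cost_swap F D perm i j)

-- ===== LEMMAS AND PROOFS =====

-- total accessors in Nat/getD form, used only by the proofs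
def gAi (M : List (List Int)) (a b : Int) : Int := (M.getD a.toNat []).getD b.toNat 0
def pvP (perm : List Int) (a : Nat) : Int := perm.getD a 0
def pvQ (perm : List Int) (I J a : Nat) : Int :=
  if a = I then pvP perm J else if a = J then pvP perm I else pvP perm a
def pvf (F D : List (List Int)) (perm : List Int) (I J a b : Nat) : Int :=
  gAi F a b * (gAi D (pvQ perm I J a) (pvQ perm I J b) - gAi D (pvP perm a) (pvP perm b))

lemma pvAt_nonneg (M : List (List Int)) (a b : Int) (ha : 0 ≤ a) (hb : 0 ≤ b) :
    pvAt M a b = gAi M a b := by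
  simp [pvAt, pvRow, pvGetI, gAi, PySem.List.pyGet?_of_nonneg _ ha,
    PySem.List.pyGet?_of_nonneg _ hb, List.getD_eq_getElem?_getD]

lemma pvGetI_natCast (xs : List Int) (k : Nat) : pvGetI xs (k : Int) = xs.getD k 0 := by
  simp [pvGetI, PySem.List.pyGet?_natCast, List.getD_eq_getElem?_getD]

lemma pvP_nonneg (perm : List Int) (hperm : ∀ v ∈ perm, 0 ≤ v) (a : Nat) : 0 ≤ pvP perm a := by
  unfold pvP
  rcases Nat.lt_or_ge a perm.length with h | h
  · rw [List.getD_eq_getElem?_getD, List.getElem?_eq_getElem h]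
    exact hperm _ (List.getElem_mem h)
  · simp [List.getD_eq_getElem?_getD, List.getElem?_eq_none h]

lemma pvQ_nonneg (perm : List Int) (hperm : ∀ v ∈ perm, 0 ≤ v) (I J a : Nat) :
    0 ≤ pvQ perm I J a := by
  unfold pvQ; split_ifs <;> exact pvP_nonneg perm hperm _

lemma pv_sum_map_range (n : Nat) (f : Nat → Int) :
    ((List.range n).map f).sum = ∑ k ∈ Finset.range n, f k := rfl

lemma pv_sum_flatMap {α : Type} (l : List α) (g : α → List Int) :
    (l.flatMap g).sum = (l.map (fun a => (g a).sum)).sum := by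
  induction l with
  | nil => rfl
  | cons x t ih => simp [List.flatMap_cons, List.sum_append, ih]

lemma pv_sum_split (n I J : Nat) (f : Nat → Nat → Int) (hI : I < n) (hJ : J < n) (hIJ : I ≠ J)
    (hz : ∀ a b : Nat, a ≠ I → a ≠ J → b ≠ I → b ≠ J → f a b = 0) :
    (∑ k ∈ Finset.range n, if k = I ∨ k = J then (0 : Int) else (f I k + f k I + f J k + f k J))
      + f I I + f J J + f I J + f J I
    = ∑ a ∈ Finset.range n, ∑ b ∈ Finset.range n, f a b := by
  have hIs : I ∈ Finset.range n := Finset.mem_range.mpr hI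
  have hJs : J ∈ (Finset.range n).erase I :=
    Finset.mem_erase.mpr ⟨Ne.symm hIJ, Finset.mem_range.mpr hJ⟩
  have split : ∀ g : Nat → Int, ∑ k ∈ Finset.range n, g k
      = g I + (g J + ∑ k ∈ ((Finset.range n).erase I).erase J, g k) := by
    intro g
    rw [← Finset.add_sum_erase _ g hIs, ← Finset.add_sum_erase _ g hJs]
  have hmem : ∀ k ∈ ((Finset.range n).erase I).erase J, k ≠ I ∧ k ≠ J := by
    intro k hk
    rcases Finset.mem_erase.mp hk with ⟨hkJ, hk'⟩
    rcases Finset.mem_erase.mp hk' with ⟨hkI, _⟩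
    exact ⟨hkI, hkJ⟩
  rw [split (fun k => if k = I ∨ k = J then (0 : Int) else (f I k + f k I + f J k + f k J)),
      split (fun a => ∑ b ∈ Finset.range n, f a b)]
  rw [split (fun b => f I b), split (fun b => f J b)]
  have hEz : ∀ a ∈ ((Finset.range n).erase I).erase J,
      ∑ b ∈ Finset.range n, f a b = f a I + f a J := by
    intro a ha
    rcases hmem a ha with ⟨haI, haJ⟩
    rw [split (fun b => f a b)]
    have : ∑ b ∈ ((Finset.range n).erase I).erase J, f a b = 0 :=
      Finset.sum_eq_zero (fun b hb => hz a b haI haJ (hmem b hb).1 (hmem b hb).2)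
    rw [this]; ring
  rw [Finset.sum_congr rfl hEz, Finset.sum_add_distrib]
  have hite : ∀ k ∈ ((Finset.range n).erase I).erase J,
      (if k = I ∨ k = J then (0 : Int) else (f I k + f k I + f J k + f k J))
        = f I k + f k I + f J k + f k J := by
    intro k hk
    rcases hmem k hk with ⟨h1, h2⟩
    simp [h1, h2]
  rw [Finset.sum_congr rfl hite]
  rw [Finset.sum_add_distrib, Finset.sum_add_distrib, Finset.sum_add_distrib]
  simp only [true_or, or_true, if_true, if_pos]
  ring

lemma pvGetI_swap (perm : List Int) (I J a : Nat)
    (hI : I < perm.length) (hJ : J < perm.length) (ha : a < perm.length) (hIJ : I ≠ J) :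
    pvGetI ((perm.set I (pvP perm J)).set J (pvP perm I)) (a : Int) = pvQ perm I J a := by
  rw [pvGetI_natCast, List.getD_eq_getElem?_getD, List.getElem?_set]
  simp only [List.length_set]
  by_cases haJ : a = J
  · subst haJ
    simp [ha, pvQ, pvP, (Ne.symm hIJ : a ≠ I), List.getD_eq_getElem?_getD,
      List.getElem?_eq_getElem hI]
  · rw [if_neg (fun hh => haJ hh.symm), List.getElem?_set]
    by_cases haI : a = I
    · subst haI
      simp [ha, pvQ, pvP, List.getD_eq_getElem?_getD, List.getElem?_eq_getElem hJ]
    · rw [if_neg (fun hh => haI hh.symm)]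
      simp [pvQ, pvP, haI, haJ, List.getD_eq_getElem?_getD]

lemma pvQ_self_I (perm : List Int) (I J : Nat) : pvQ perm I J I = pvP perm J := by
  simp [pvQ]

lemma pvQ_self_J (perm : List Int) (I J : Nat) (hIJ : I ≠ J) : pvQ perm I J J = pvP perm I := by
  simp [pvQ, Ne.symm hIJ]

lemma pvQ_other (perm : List Int) (I J k : Nat) (h1 : k ≠ I) (h2 : k ≠ J) :
    pvQ perm I J k = pvP perm k := by
  simp [pvQ, h1, h2]

lemma pv_A_eq_sum (F D : List (List Int)) (perm : List Int) (I J : Nat)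
    (hI : I < perm.length) (hJ : J < perm.length) (hIJ : I ≠ J)
    (hperm : ∀ v ∈ perm, 0 ≤ v) :
    delta_cost_swap F D perm (I : Int) (J : Int) =
      (∑ k ∈ Finset.range perm.length, if k = I ∨ k = J then (0 : Int) else
        (pvf F D perm I J I k + pvf F D perm I J k I + pvf F D perm I J J k + pvf F D perm I J k J))
      + pvf F D perm I J I I + pvf F D perm I J J J
      + pvf F D perm I J I J + pvf F D perm I J J I := by
  have hij : (I : Int) ≠ (J : Int) := by exact_mod_cast hIJ
  have hg : ∀ a : Nat, (0 : Int) ≤ perm.getD a 0 := fun a => pvP_nonneg perm hperm a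
  have hAt : ∀ (M : List (List Int)) (a b : Nat), pvAt M (a : Int) (b : Int) = gAi M (a : Int) (b : Int) :=
    fun M a b => pvAt_nonneg M _ _ (Int.natCast_nonneg a) (Int.natCast_nonneg b)
  have hAtD : ∀ a b : Nat, pvAt D (perm.getD a 0) (perm.getD b 0) = gAi D (perm.getD a 0) (perm.getD b 0) :=
    fun a b => pvAt_nonneg D _ _ (hg a) (hg b)
  simp only [delta_cost_swap, if_neg hij]
  rw [PySem.List.pyRange_zero_natCast perm.length, List.foldl_map]
  rw [PySem.List.foldl_congr_mem _ _ (fun (delta : Int) (k : Nat) => delta +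
      (if k = I ∨ k = J then (0 : Int) else
        (pvf F D perm I J I k + pvf F D perm I J k I + pvf F D perm I J J k + pvf F D perm I J k J))) _ ?_]
  · rw [PySem.List.foldl_add, zero_add, pv_sum_map_range]
    simp only [pvf, pvQ_self_I, pvQ_self_J perm I J hIJ, pvGetI_natCast, pvP, hAt, hAtD]
    ring
  · intro acc k _
    by_cases hkc : k = I ∨ k = J
    · have hkc' : ((k : Int) = (I : Int) ∨ (k : Int) = (J : Int)) := by exact_mod_cast hkc
      simp only [if_pos hkc', if_pos hkc, add_zero]
    · rw [not_or] at hkc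
      have hkc' : ¬((k : Int) = (I : Int) ∨ (k : Int) = (J : Int)) :=
        not_or.mpr ⟨fun hh => hkc.1 (by exact_mod_cast hh), fun hh => hkc.2 (by exact_mod_cast hh)⟩
      simp only [if_neg hkc', if_neg (not_or.mpr hkc)]
      simp only [pvf, pvQ_self_I, pvQ_self_J perm I J hIJ, pvQ_other perm I J k hkc.1 hkc.2,
        pvGetI_natCast, pvP, hAt, hAtD]
      ring

lemma pv_B_eq_sum (F D : List (List Int)) (perm : List Int) (I J : Nat)
    (hI : I < perm.length) (hJ : J < perm.length) (hIJ : I ≠ J)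
    (hperm : ∀ v ∈ perm, 0 ≤ v) :
    delta_cost_swap_alt F D perm (I : Int) (J : Int) =
      ∑ a ∈ Finset.range perm.length, ∑ b ∈ Finset.range perm.length, pvf F D perm I J a b := by
  have hijc : ((I : Int)) ≠ ((J : Int)) := by exact_mod_cast hIJ
  have hg : ∀ a : Nat, (0 : Int) ≤ perm.getD a 0 := fun a => pvP_nonneg perm hperm a
  have hAt : ∀ (M : List (List Int)) (a b : Nat), pvAt M (a : Int) (b : Int) = gAi M (a : Int) (b : Int) :=
    fun M a b => pvAt_nonneg M _ _ (Int.natCast_nonneg a) (Int.natCast_nonneg b)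
  have hTot : ∀ (p : List Int) (G : Nat → Int),
      (∀ a : Nat, a < perm.length → pvGetI p (a : Int) = G a) → (∀ a : Nat, 0 ≤ G a) →
      pvTotal F D p (perm.length : Int) =
        ∑ a ∈ Finset.range perm.length, ∑ b ∈ Finset.range perm.length,
          gAi F (a : Int) (b : Int) * gAi D (G a) (G b) := by
    intro p G hGp hGn
    unfold pvTotal
    rw [PySem.List.pyRange_zero_natCast, List.flatMap_map, pv_sum_flatMap]
    simp only [List.map_map]
    rw [pv_sum_map_range]
    refine Finset.sum_congr rfl (fun a ha => ?_)
    have ha' : a < perm.length := Finset.mem_range.mp ha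
    rw [pv_sum_map_range]
    refine Finset.sum_congr rfl (fun b hb => ?_)
    have hb' : b < perm.length := Finset.mem_range.mp hb
    simp only [Function.comp_apply]
    rw [hAt F a b, hGp a ha', hGp b hb',
      pvAt_nonneg D (G a) (G b) (hGn a) (hGn b)]
  have hq : PySem.List.pySetD (PySem.List.pySetD perm (I : Int) (pvGetI perm (J : Int))) (J : Int) (pvGetI perm (I : Int))
      = (perm.set I (pvP perm J)).set J (pvP perm I) := by
    rw [PySem.List.pySetD_of_nonneg _ _ (Int.natCast_nonneg I),
        PySem.List.pySetD_of_nonneg _ _ (Int.natCast_nonneg J)]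
    simp only [Int.toNat_natCast, pvGetI_natCast]
    rfl
  unfold delta_cost_swap_alt
  rw [if_neg hijc]
  show pvTotal F D (PySem.List.pySetD (PySem.List.pySetD perm (I : Int) (pvGetI perm (J : Int))) (J : Int) (pvGetI perm (I : Int))) (perm.length : Int)
      - pvTotal F D perm (perm.length : Int) = _
  rw [hq]
  rw [hTot ((perm.set I (pvP perm J)).set J (pvP perm I)) (pvQ perm I J)
        (fun a ha => pvGetI_swap perm I J a hI hJ ha hIJ)
        (fun a => pvQ_nonneg perm hperm I J a),
      hTot perm (pvP perm) (fun a _ => pvGetI_natCast perm a) (fun a => hg a)]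
  rw [← Finset.sum_sub_distrib]
  refine Finset.sum_congr rfl (fun a _ => ?_)
  rw [← Finset.sum_sub_distrib]
  refine Finset.sum_congr rfl (fun b _ => ?_)
  simp only [pvf]
  ring

lemma pv_main (F D : List (List Int)) (perm : List Int) (I J : Nat)
    (hI : I < perm.length) (hJ : J < perm.length) (hIJ : I ≠ J)
    (hperm : ∀ v ∈ perm, 0 ≤ v) :
    delta_cost_swap F D perm (I : Int) (J : Int) = delta_cost_swap_alt F D perm (I : Int) (J : Int) := by
  rw [pv_A_eq_sum F D perm I J hI hJ hIJ hperm, pv_B_eq_sum F D perm I J hI hJ hIJ hperm]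
  exact pv_sum_split perm.length I J (pvf F D perm I J) hI hJ hIJ
    (fun a b h1 h2 h3 h4 => by
      simp [pvf, pvQ_other perm I J a h1 h2, pvQ_other perm I J b h3 h4])

-- ===== VERDICT =====
theorem delta_cost_swap_spec : Claim_equal_delta_cost_swap := by
  intro F D perm i j _ hpre
  show delta_cost_swap F D perm i j = delta_cost_swap_alt F D perm i j
  by_cases hij0 : i = j
  · simp [delta_cost_swap, delta_cost_swap_alt, hij0]
  · obtain ⟨_, _, hv, ⟨h0i, hi2⟩, h0j, hj2⟩ := hpre.resolve_left hij0
    have hperm : ∀ v ∈ perm, 0 ≤ v := fun v hvm => (hv v hvm).1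
    have hiI : i = ((i.toNat : Nat) : Int) := (Int.toNat_of_nonneg h0i).symm
    have hjJ : j = ((j.toNat : Nat) : Int) := (Int.toNat_of_nonneg h0j).symm
    rw [hiI, hjJ]
    exact pv_main F D perm i.toNat j.toNat (by omega) (by omega) (by omega) hperm
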